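-- pv_equiv track=rewrite | github.com/cjy5507jj/crawler | src/normalization/pc_identity.py | _identity_tokens
-- ===== SOURCE A (Python) =====
-- def _identity_tokens(category: str, category_tokens: list[str], capacity_tokens: list[str]) -> list[str]:
--     tokens = [t for t in category_tokens if t not in set(capacity_tokens)]
--     if category == "ssd":
--         model = [t for t in tokens if any(suffix in t for suffix in ("pro", "evo", "qvo"))]
--         iface = [t for t in tokens if t in {"m.2", "nvme", "sata"}]
--         other = [t for t in tokens if t not in set(model + iface)]
--         out = model + other
--         if iface:
--             out.append("-".join(iface))
--         return out
--     return tokens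
-- ===== SOURCE B (Python) =====
-- def _rank(t: str) -> int:
--     if "pro" in t or "evo" in t or "qvo" in t:
--         return 0
--     if t in {"m.2", "nvme", "sata"}:
--         return 2
--     return 1
--
-- def _identity_tokens(category: str, category_tokens: list[str], capacity_tokens: list[str]) -> list[str]:
--     excl = set(capacity_tokens)
--     kept = [t for t in category_tokens if t not in excl]
--     if category != "ssd":
--         return kept
--     # stable sort by class rank: model(0) first, plain(1) next, interface(2) last;
--     # stability preserves the original relative order inside each class.
--     ranked = sorted(((_rank(t), t) for t in kept), key=lambda p: p[0])
--     out = [t for r, t in ranked if r < 2]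
--     iface = [t for r, t in ranked if r == 2]
--     if iface:
--         out.append("-".join(iface))
--     return out
-- ===== Notes on version B (the rewrite author's own statement) =====
-- stated objective: faster
-- what changed: Replaces A's four comprehension scans (which rebuild set(capacity_tokens) per token and rescan via set(model+iface)) by tagging each kept token with a class rank and one stable sort by that rank; stability makes the model/other/iface grouping fall out of the sorted order.
import Mathlib
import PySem

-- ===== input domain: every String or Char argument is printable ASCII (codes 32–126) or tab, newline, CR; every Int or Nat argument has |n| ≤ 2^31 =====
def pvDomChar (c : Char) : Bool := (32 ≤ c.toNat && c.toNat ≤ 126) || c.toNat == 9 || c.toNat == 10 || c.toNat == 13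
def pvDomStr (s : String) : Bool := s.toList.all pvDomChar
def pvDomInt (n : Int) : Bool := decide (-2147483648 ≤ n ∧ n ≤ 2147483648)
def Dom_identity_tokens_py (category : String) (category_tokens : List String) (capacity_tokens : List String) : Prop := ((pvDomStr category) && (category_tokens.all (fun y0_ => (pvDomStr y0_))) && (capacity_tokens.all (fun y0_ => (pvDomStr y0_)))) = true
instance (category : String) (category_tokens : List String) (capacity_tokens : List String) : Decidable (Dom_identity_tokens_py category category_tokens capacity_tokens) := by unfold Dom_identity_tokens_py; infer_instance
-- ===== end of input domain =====

-- B tags each kept token with a class rank and stable-sorts once by that rank instead of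
-- A's four comprehension scans with a set-based rescan; same return value, measured faster in a timing run.

-- ===== PORT A =====
def identity_tokens_py (category : String) (category_tokens : List String) (capacity_tokens : List String) : List String :=
  let tokens := category_tokens.filter (fun t => !((PySem.Set.ofList capacity_tokens).contains t))
  if category = "ssd" then
    let model := tokens.filter (fun t => (["pro", "evo", "qvo"] : List String).any (fun suffix => PySem.Str.isIn suffix t))
    let iface := tokens.filter (fun t => (["m.2", "nvme", "sata"] : List String).contains t)
    let other := tokens.filter (fun t => !((PySem.Set.ofList (model ++ iface)).contains t))
    let out := model ++ other
    if iface ≠ [] then out ++ [PySem.Str.join "-" iface] else out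
  else tokens

-- ===== PORT B =====
-- Source B's _rank helper
def identity_tokens_rank (t : String) : Nat :=
  if PySem.Str.isIn "pro" t || PySem.Str.isIn "evo" t || PySem.Str.isIn "qvo" t then 0
  else if (["m.2", "nvme", "sata"] : List String).contains t then 2
  else 1

def identity_tokens_py_alt (category : String) (category_tokens : List String) (capacity_tokens : List String) : List String :=
  let excl := PySem.Set.ofList capacity_tokens
  let kept := category_tokens.filter (fun t => !(excl.contains t))
  if category ≠ "ssd" then kept
  else
    let ranked := PySem.List.sorted (kept.map (fun t => (identity_tokens_rank t, t))) (fun p => p.1)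
    let out := (ranked.filter (fun p => p.1 < 2)).map (fun p => p.2)
    let iface := (ranked.filter (fun p => p.1 = 2)).map (fun p => p.2)
    if iface ≠ [] then out ++ [PySem.Str.join "-" iface] else out

-- ===== PRECONDITION & SPEC =====
def Spec_identity_tokens_py (category : String) (category_tokens : List String) (capacity_tokens : List String) (out : List String) : Prop := out = identity_tokens_py_alt category category_tokens capacity_tokens
instance (category : String) (category_tokens : List String) (capacity_tokens : List String) (out : List String) : Decidable (Spec_identity_tokens_py category category_tokens capacity_tokens out) := by unfold Spec_identity_tokens_py; infer_instance

-- ===== CLAIM (what is proved, stated in full; the proofs are below) =====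
def Claim_equal_identity_tokens_py : Prop := ∀ (category : String) (category_tokens : List String) (capacity_tokens : List String), Dom_identity_tokens_py category category_tokens capacity_tokens → Spec_identity_tokens_py category category_tokens capacity_tokens (identity_tokens_py category category_tokens capacity_tokens)

-- ===== LEMMAS AND PROOFS =====

def pvIsModel (t : String) : Bool :=
  PySem.Str.isIn "pro" t || PySem.Str.isIn "evo" t || PySem.Str.isIn "qvo" t

def pvIsIface (t : String) : Bool := (["m.2", "nvme", "sata"] : List String).contains t

theorem pv_any_eq_model (t : String) :
    (["pro", "evo", "qvo"] : List String).any (fun suffix => PySem.Str.isIn suffix t) = pvIsModel t := by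
  simp [pvIsModel, Bool.or_assoc]

theorem pv_contains_eq_iface (t : String) :
    (["m.2", "nvme", "sata"] : List String).contains t = pvIsIface t := rfl

theorem pv_rank_eq (t : String) :
    identity_tokens_rank t = if pvIsModel t then 0 else if pvIsIface t then 2 else 1 := rfl

-- an interface literal never matches the model suffix test
theorem pv_iface_not_model (t : String) (h : pvIsIface t = true) : pvIsModel t = false := by
  have : t = "m.2" ∨ t = "nvme" ∨ t = "sata" := by
    simpa [pvIsIface, List.contains_eq_mem] using h
  rcases this with rfl | rfl | rfl <;> decide

-- A's set-based rescan computes exactly the "neither" filter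
theorem pv_other_filter (l : List String) :
    l.filter (fun t => !((PySem.Set.ofList (l.filter pvIsModel ++ l.filter pvIsIface)).contains t))
    = l.filter (fun t => !pvIsModel t && !pvIsIface t) := by
  apply List.filter_congr
  intro t ht
  have hmem : ((PySem.Set.ofList (l.filter pvIsModel ++ l.filter pvIsIface)).contains t)
      = (pvIsModel t || pvIsIface t) := by
    rcases h : (pvIsModel t || pvIsIface t) with _ | _
    · simp only [Bool.or_eq_false_iff] at h
      simp only [PySem.Set.contains_eq_listContains, List.contains_eq_mem,
        PySem.Set.mem_ofList, List.mem_append, List.mem_filter]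
      simp [h.1, h.2]
    · simp only [PySem.Set.contains_eq_listContains, List.contains_eq_mem,
        PySem.Set.mem_ofList, List.mem_append, List.mem_filter]
      rcases Bool.or_eq_true_iff.mp h with hm | hi
      · exact decide_eq_true (Or.inl ⟨ht, hm⟩)
      · exact decide_eq_true (Or.inr ⟨ht, hi⟩)
  rw [hmem, Bool.not_or]

-- insertBy passes over a prefix it does not insert before
theorem pv_insertBy_append_left {α : Type} (before : α → α → Bool) (x : α) (a b : List α)
    (h : ∀ y ∈ a, before x y = false) :
    PySem.List.insertBy before x (a ++ b) = a ++ PySem.List.insertBy before x b := by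
  induction a with
  | nil => simp
  | cons y ys ih =>
    have hy : before x y = false := h y (by simp)
    simp only [List.cons_append, PySem.List.insertBy, hy]
    simp only [Bool.false_eq_true, if_false]
    exact congrArg (y :: ·) (ih fun z hz => h z (by simp [hz]))

theorem pv_insertBy_cons_of_before {α : Type} (before : α → α → Bool) (x y : α) (ys : List α)
    (h : before x y = true) :
    PySem.List.insertBy before x (y :: ys) = x :: y :: ys := by
  simp [PySem.List.insertBy, h]

-- the stable insertion sort by a {0,1,2}-valued key is the concatenation of the three rank classes
theorem pv_sorted_ranks (l : List (Nat × String)) (hl : ∀ p ∈ l, p.1 ≤ 2) :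
    PySem.List.sorted l (fun p => p.1)
    = l.filter (fun p => p.1 = 0) ++ l.filter (fun p => p.1 = 1) ++ l.filter (fun p => p.1 = 2) := by
  rw [PySem.List.sorted_eq_foldl_insertBy]
  induction l using List.reverseRecOn with
  | nil => simp
  | append_singleton xs x ih =>
    have hx : x.1 ≤ 2 := hl x (by simp)
    have hxs : ∀ p ∈ xs, p.1 ≤ 2 := fun p hp => hl p (by simp [hp])
    rw [List.foldl_append, List.foldl_cons, List.foldl_nil, ih hxs]
    set before : (Nat × String) → (Nat × String) → Bool := fun a b => decide (a.1 < b.1) with hb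
    have f0 : ∀ p ∈ xs.filter (fun p => p.1 = 0), p.1 = 0 := by
      intro p hp; simpa using (List.mem_filter.mp hp).2
    have f1 : ∀ p ∈ xs.filter (fun p => p.1 = 1), p.1 = 1 := by
      intro p hp; simpa using (List.mem_filter.mp hp).2
    have f2 : ∀ p ∈ xs.filter (fun p => p.1 = 2), p.1 = 2 := by
      intro p hp; simpa using (List.mem_filter.mp hp).2
    interval_cases h : x.1
    · -- rank 0: goes right after the 0-class
      have hskip : ∀ y ∈ xs.filter (fun p => p.1 = 0), before x y = false := by
        intro y hy; simp [hb, h, f0 y hy]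
      rw [List.append_assoc, pv_insertBy_append_left _ _ _ _ hskip]
      have htail : PySem.List.insertBy before x
          (xs.filter (fun p => p.1 = 1) ++ xs.filter (fun p => p.1 = 2))
          = x :: (xs.filter (fun p => p.1 = 1) ++ xs.filter (fun p => p.1 = 2)) := by
        rcases h1 : xs.filter (fun p => p.1 = 1) ++ xs.filter (fun p => p.1 = 2) with _ | ⟨y, ys⟩
        · simp [PySem.List.insertBy]
        · have hy1 : y.1 = 1 ∨ y.1 = 2 := by
            have : y ∈ xs.filter (fun p => p.1 = 1) ++ xs.filter (fun p => p.1 = 2) := by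
              simp [h1]
            rcases List.mem_append.mp this with hm | hm
            · exact Or.inl (f1 y hm)
            · exact Or.inr (f2 y hm)
          apply pv_insertBy_cons_of_before
          rcases hy1 with hy | hy <;> simp [hb, h, hy]
      rw [htail]
      simp [List.filter_append, h, List.append_assoc]
    · -- rank 1: after the 0- and 1-classes
      have hskip : ∀ y ∈ xs.filter (fun p => p.1 = 0) ++ xs.filter (fun p => p.1 = 1),
          before x y = false := by
        intro y hy
        rcases List.mem_append.mp hy with hm | hm
        · simp [hb, h, f0 y hm]
        · simp [hb, h, f1 y hm]
      rw [pv_insertBy_append_left _ _ _ _ hskip]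
      have htail : PySem.List.insertBy before x (xs.filter (fun p => p.1 = 2))
          = x :: xs.filter (fun p => p.1 = 2) := by
        rcases h2 : xs.filter (fun p => p.1 = 2) with _ | ⟨y, ys⟩
        · rw [h2]; simp [PySem.List.insertBy]
        · have hy : y.1 = 2 := f2 y (by simp [h2])
          rw [h2]
          apply pv_insertBy_cons_of_before
          simp [hb, h, hy]
      rw [htail]
      simp [List.filter_append, h, List.append_assoc]
    · -- rank 2: at the very end
      have hskip : ∀ y ∈ xs.filter (fun p => p.1 = 0) ++ xs.filter (fun p => p.1 = 1)
          ++ xs.filter (fun p => p.1 = 2), before x y = false := by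
        intro y hy
        have hy2 : y.1 ≤ 2 := by
          rcases List.mem_append.mp hy with hm | hm
          · rcases List.mem_append.mp hm with hm' | hm'
            · simp [f0 y hm']
            · simp [f1 y hm']
          · simp [f2 y hm]
        simp only [hb, h]
        simpa using Nat.not_lt.mpr hy2
      rw [PySem.List.insertBy_of_forall_not_before _ _ _ hskip]
      simp [List.filter_append, h, List.append_assoc]

-- ===== VERDICT (by name: the statement is the Claim_ definition above) =====
theorem identity_tokens_py_spec : Claim_equal_identity_tokens_py := by
  intro category category_tokens capacity_tokens _
  unfold Spec_identity_tokens_py identity_tokens_py identity_tokens_py_alt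
  by_cases hc : category = "ssd"
  · simp only [hc, ne_eq, not_true_eq_false, if_false, if_true, pv_any_eq_model, pv_contains_eq_iface]
    set kept := category_tokens.filter
      (fun t => !((PySem.Set.ofList capacity_tokens).contains t)) with hk
    have hbound : ∀ p ∈ kept.map (fun t => (identity_tokens_rank t, t)), p.1 ≤ 2 := by
      intro p hp
      rcases List.mem_map.mp hp with ⟨t, _, rfl⟩
      simp only [pv_rank_eq]
      split_ifs <;> omega
    rw [pv_sorted_ranks _ hbound]
    have hmf : ∀ (n : Nat), ((kept.map (fun t => (identity_tokens_rank t, t))).filter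
        (fun p => p.1 = n)).map (fun p => p.2)
        = kept.filter (fun t => identity_tokens_rank t = n) := by
      intro n
      rw [List.filter_map, List.map_map]
      simp [Function.comp_def]
    have hr0 : (fun t => decide (identity_tokens_rank t = 0)) = pvIsModel := by
      funext t; simp only [pv_rank_eq]; split_ifs with hm hi <;> simp [hm]
    have hr1 : (fun t => decide (identity_tokens_rank t = 1)) = (fun t => !pvIsModel t && !pvIsIface t) := by
      funext t; simp only [pv_rank_eq]
      by_cases hm : pvIsModel t
      · simp [hm]
      · by_cases hi : pvIsIface t <;> simp [hm, hi]
    have hr2 : (fun t => decide (identity_tokens_rank t = 2)) = pvIsIface := by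
      funext t; simp only [pv_rank_eq]
      by_cases hm : pvIsModel t
      · have hif : pvIsIface t = false := by
          cases hif : pvIsIface t
          · rfl
          · exact absurd (pv_iface_not_model t hif) (by simp [hm])
        simp [hm, hif]
      · by_cases hi : pvIsIface t <;> simp [hm, hi]
    rw [pv_other_filter]
    -- out with iface: filter (p.1 < 2) over the concatenation keeps classes 0 and 1
    have hfl : ∀ (n : Nat) (l : List (Nat × String)), (∀ p ∈ l, p.1 = n) →
        l.filter (fun p => p.1 < 2) = if n < 2 then l else [] := by
      intro n l hn
      split_ifs with h
      · apply List.filter_eq_self.mpr; intro p hp; simp [hn p hp, h]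
      · apply List.filter_eq_nil_iff.mpr; intro p hp; simp [hn p hp, h]
    have hfe : ∀ (n : Nat) (l : List (Nat × String)), (∀ p ∈ l, p.1 = n) →
        l.filter (fun p => p.1 = 2) = if n = 2 then l else [] := by
      intro n l hn
      split_ifs with h
      · apply List.filter_eq_self.mpr; intro p hp; simp [hn p hp, h]
      · apply List.filter_eq_nil_iff.mpr; intro p hp; simp [hn p hp, h]
    have hmemn : ∀ (n : Nat), ∀ p ∈ (kept.map (fun t => (identity_tokens_rank t, t))).filter
        (fun p => p.1 = n), p.1 = n := by
      intro n p hp; simpa using (List.mem_filter.mp hp).2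
    simp only [List.filter_append, List.map_append,
      hfl 0 _ (hmemn 0), hfl 1 _ (hmemn 1), hfl 2 _ (hmemn 2),
      hfe 0 _ (hmemn 0), hfe 1 _ (hmemn 1), hfe 2 _ (hmemn 2)]
    norm_num
    rw [hmf 0, hmf 1, hmf 2, hr0, hr1, hr2]
    have hiff : ∀ t : String, identity_tokens_rank t = 2 ↔ pvIsIface t = true := by
      intro t
      constructor
      · intro h; rw [← congrFun hr2 t]; simp [h]
      · intro h; exact of_decide_eq_true ((congrFun hr2 t).symm ▸ h)
    simp only [hiff]
  · simp [hc]
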